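-- pv_equiv track=rewrite | github.com/Evidune/Evidune | agent/core.py | _worker_skill_groups
-- ===== SOURCE A (Python) =====
-- def _worker_skill_groups(relevant_skills: list, branches: int) -> list[list]:
--     if branches <= 0:
--         return []
--     groups: list[list] = [[] for _ in range(branches)]
--     if not relevant_skills:
--         return groups
--     for skill in relevant_skills[: branches * 2]:
--         target = min(range(branches), key=lambda idx: len(groups[idx]))
--         groups[target].append(skill)
--     return groups
-- ===== SOURCE B (Python) =====
-- def _worker_skill_groups(relevant_skills: list, branches: int) -> list[list]:
--     if branches <= 0:
--         return []
--     s = relevant_skills[: branches * 2]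
--     return [s[i::branches] for i in range(branches)]
-- ===== Notes on version B (the rewrite author's own statement) =====
-- stated objective: faster
-- what changed: A repeatedly scans all branch groups for the least-filled one (first minimum) per skill; since groups start empty and at most 2*branches skills are placed, that argmin is provably round-robin, so B returns the closed-form striding slices s[i::branches] of the first branches*2 skills with no loop or argmin at all.
import Mathlib
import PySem

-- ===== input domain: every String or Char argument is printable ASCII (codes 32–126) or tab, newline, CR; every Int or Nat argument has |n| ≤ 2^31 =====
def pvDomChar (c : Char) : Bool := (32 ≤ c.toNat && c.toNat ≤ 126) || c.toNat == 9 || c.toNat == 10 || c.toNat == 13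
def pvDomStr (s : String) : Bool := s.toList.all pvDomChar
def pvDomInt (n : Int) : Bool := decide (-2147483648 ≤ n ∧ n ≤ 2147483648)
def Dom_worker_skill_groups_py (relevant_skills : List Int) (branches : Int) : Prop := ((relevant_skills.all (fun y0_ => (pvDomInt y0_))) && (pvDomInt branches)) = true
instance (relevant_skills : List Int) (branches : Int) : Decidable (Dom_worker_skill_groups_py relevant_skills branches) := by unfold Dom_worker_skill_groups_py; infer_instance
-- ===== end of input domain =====

-- B replaces A's per-skill argmin scan over all branches by a closed-form round-robin
-- slicing (groups[i] = s[i::branches]); objective: faster (removes the inner scan).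

-- ===== PORT A =====
-- literal transliteration of A: build `branches` empty groups, then for each of the
-- first branches*2 skills append it to the first shortest group (min(range, key=len)).
def worker_skill_groups_py (relevant_skills : List Int) (branches : Int) : List (List Int) :=
  if branches ≤ 0 then []
  else
    let groups : List (List Int) := (PySem.List.pyRange 0 branches 1).map (fun _ => [])
    if relevant_skills = [] then groups
    else
      (PySem.List.slice relevant_skills none (some (branches * 2))).foldl
        (fun groups skill =>
          let target : Int := (PySem.List.min? (PySem.List.pyRange 0 branches 1)
            (fun idx => (PySem.List.pyGetD groups idx ([] : List Int)).length)).getD 0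
          PySem.List.pySetD groups target (PySem.List.pyGetD groups target [] ++ [skill]))
        groups

-- ===== PORT B =====
-- literal transliteration of B: s = relevant_skills[:branches*2];
-- [s[i::branches] for i in range(branches)]
def worker_skill_groups_py_alt (relevant_skills : List Int) (branches : Int) : List (List Int) :=
  if branches ≤ 0 then []
  else
    let s := PySem.List.slice relevant_skills none (some (branches * 2))
    (PySem.List.pyRange 0 branches 1).map
      (fun i => (PySem.List.slice? s (some i) none branches).getD [])

-- ===== PRECONDITION & SPEC =====
def Spec_worker_skill_groups_py (relevant_skills : List Int) (branches : Int) (out : List (List Int)) : Prop := out = worker_skill_groups_py_alt relevant_skills branches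
instance (relevant_skills : List Int) (branches : Int) (out : List (List Int)) : Decidable (Spec_worker_skill_groups_py relevant_skills branches out) := by unfold Spec_worker_skill_groups_py; infer_instance

-- ===== CLAIM (what is proved, stated in full; the proofs are below) =====
def Claim_equal_worker_skill_groups_py : Prop := ∀ (relevant_skills : List Int) (branches : Int), Dom_worker_skill_groups_py relevant_skills branches → Spec_worker_skill_groups_py relevant_skills branches (worker_skill_groups_py relevant_skills branches)

-- ===== LEMMAS AND PROOFS =====

-- the common description of both results: group i holds s[i] (if present) and s[i+b] (if present)
def pvGrp (b : Nat) (s : List Int) (i : Nat) : List Int :=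
  (s.drop i).take 1 ++ (s.drop (i + b)).take 1

def pvG (b : Nat) (s : List Int) : List (List Int) :=
  (List.range b).map (pvGrp b s)

lemma pv_take1_drop (l : List Int) (i : Nat) :
    (l.drop i).take 1 = if i < l.length then [l.getD i 0] else [] := by
  split_ifs with h
  · rw [List.take_one_drop_eq_of_lt_length h]; simp [List.getD, h]
  · simp [List.drop_eq_nil_of_le (Nat.le_of_not_lt h)]

lemma pv_getD_take (l : List Int) (k i : Nat) (h : i < k) :
    (l.take k).getD i 0 = l.getD i 0 := by
  simp [List.getD_eq_getElem?_getD, h]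

lemma pv_grp_take (b : Nat) (s : List Int) (k i : Nat) :
    pvGrp b (s.take k) i =
      (if i < min k s.length then [s.getD i 0] else []) ++
      (if i + b < min k s.length then [s.getD (i + b) 0] else []) := by
  rw [pvGrp, pv_take1_drop, pv_take1_drop, List.length_take]
  congr 1
  · split_ifs with h
    · rw [pv_getD_take s k i (by omega)]
    · rfl
  · split_ifs with h
    · rw [pv_getD_take s k (i + b) (by omega)]
    · rfl

-- Python's min(_, key=_) keeps the FIRST minimum; characterisation used on A's argmin
def pvMinStep {α κ : Type} [LinearOrder κ] (key : α → κ) (acc : Option α) (x : α) : Option α :=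
  match acc with
  | none => some x
  | some m => if key x < key m then some x else some m

lemma pv_minstep_keep {α κ : Type} [LinearOrder κ] (key : α → κ) (l : List α) :
    ∀ (m : α), (∀ z ∈ l, key m ≤ key z) → l.foldl (pvMinStep key) (some m) = some m := by
  induction l with
  | nil => intro m _; rfl
  | cons z l ih =>
      intro m h
      have hz : pvMinStep key (some m) z = some m := by
        simp [pvMinStep, not_lt.mpr (h z (by simp))]
      rw [List.foldl_cons, hz]
      exact ih m (fun z hz => h z (by simp [hz]))

lemma pv_minstep_mem {α κ : Type} [LinearOrder κ] (key : α → κ) (l : List α) :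
    ∀ (m : α), ∃ m', (m' = m ∨ m' ∈ l) ∧ l.foldl (pvMinStep key) (some m) = some m' := by
  induction l with
  | nil => intro m; exact ⟨m, Or.inl rfl, rfl⟩
  | cons z l ih =>
      intro m
      rw [List.foldl_cons]
      by_cases hzm : key z < key m
      · obtain ⟨m', hmem, hm'⟩ := ih z
        refine ⟨m', ?_, by simpa [pvMinStep, hzm] using hm'⟩
        rcases hmem with h | h
        · exact Or.inr (by simp [h])
        · exact Or.inr (by simp [h])
      · obtain ⟨m', hmem, hm'⟩ := ih m
        refine ⟨m', ?_, by simpa [pvMinStep, hzm] using hm'⟩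
        rcases hmem with h | h
        · exact Or.inl h
        · exact Or.inr (by simp [h])

lemma pv_min?_first {α κ : Type} [LinearOrder κ] (key : α → κ) (ys : List α) (x : α) (zs : List α)
    (h1 : ∀ y ∈ ys, key x < key y) (h2 : ∀ z ∈ zs, key x ≤ key z) :
    PySem.List.min? (ys ++ x :: zs) key = some x := by
  have hfold : PySem.List.min? (ys ++ x :: zs) key =
      (ys ++ x :: zs).foldl (pvMinStep key) none := rfl
  rw [hfold, List.foldl_append]
  cases ys with
  | nil =>
      rw [List.foldl_nil, List.foldl_cons]
      exact pv_minstep_keep key zs x h2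
  | cons y ys' =>
      obtain ⟨m, hmem, hm⟩ := pv_minstep_mem key ys' y
      have hacc : (y :: ys').foldl (pvMinStep key) none = some m := by
        rw [List.foldl_cons]; exact hm
      rw [hacc, List.foldl_cons]
      have hmys : m ∈ y :: ys' := by
        rcases hmem with h | h
        · simp [h]
        · simp [h]
      have hxm : key x < key m := h1 m hmys
      have hstep : pvMinStep key (some m) x = some x := by
        simp [pvMinStep, hxm]
      rw [hstep]
      exact pv_minstep_keep key zs x h2

-- length of group j of the round-robin state after k skills
lemma pv_keylen (br : Int) (s : List Int) (k : Nat) (hk : k ≤ s.length)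
    (j : Nat) (hj : j < br.toNat) :
    (PySem.List.pyGetD (pvG br.toNat (s.take k)) (j : Int) ([] : List Int)).length =
      min 1 (k - j) + min 1 (k - (j + br.toNat)) := by
  rw [PySem.List.pyGetD_natCast, pvG, PySem.List.getD_map_range _ _ _ _ hj]
  simp [pvGrp, List.length_take, List.length_drop]
  omega

-- A's argmin over range(branches) is the round-robin target k (resp. k - branches)
lemma pv_target (br : Int) (hbr : 0 < br) (s : List Int) (hlen : s.length ≤ 2 * br.toNat)
    (k : Nat) (hk : k < s.length) (t0 : Nat)
    (ht0 : t0 = if k < br.toNat then k else k - br.toNat) :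
    PySem.List.min? (PySem.List.pyRange 0 br 1)
      (fun idx => (PySem.List.pyGetD (pvG br.toNat (s.take k)) idx ([] : List Int)).length)
      = some (t0 : Int) := by
  have hb : 0 < br.toNat := by omega
  have hcase : (k < br.toNat ∧ t0 = k) ∨ (br.toNat ≤ k ∧ t0 = k - br.toNat) := by
    split_ifs at ht0 with h
    · exact Or.inl ⟨h, ht0⟩
    · exact Or.inr ⟨by omega, ht0⟩
  have ht0b : t0 < br.toNat := by omega
  have hsplit : PySem.List.pyRange 0 br 1 =
      PySem.List.pyRange 0 (t0 : Int) 1 ++ (t0 : Int) :: PySem.List.pyRange ((t0 : Int) + 1) br 1 := by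
    rw [PySem.List.pyRange_one_append 0 (t0 : Int) br (by omega) (by omega),
        PySem.List.pyRange_one_cons (a := (t0 : Int)) (b := br) (by omega)]
  rw [hsplit]
  apply pv_min?_first
  · intro y hy
    rw [PySem.List.mem_pyRange_one] at hy
    have hyj : y = ((y.toNat : Nat) : Int) := by omega
    rw [hyj]
    rw [pv_keylen br s k (Nat.le_of_lt hk) y.toNat (by omega),
        pv_keylen br s k (Nat.le_of_lt hk) t0 ht0b]
    omega
  · intro y hy
    rw [PySem.List.mem_pyRange_one] at hy
    have hyj : y = ((y.toNat : Nat) : Int) := by omega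
    rw [hyj]
    rw [pv_keylen br s k (Nat.le_of_lt hk) y.toNat (by omega),
        pv_keylen br s k (Nat.le_of_lt hk) t0 ht0b]
    omega

-- A's loop step applied to the round-robin state is the next round-robin state
lemma pv_stepA (br : Int) (hbr : 0 < br) (s : List Int) (hlen : s.length ≤ 2 * br.toNat)
    (k : Nat) (hk : k < s.length) :
    (let target : Int := (PySem.List.min? (PySem.List.pyRange 0 br 1)
        (fun idx => (PySem.List.pyGetD (pvG br.toNat (s.take k)) idx ([] : List Int)).length)).getD 0
     PySem.List.pySetD (pvG br.toNat (s.take k)) target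
       (PySem.List.pyGetD (pvG br.toNat (s.take k)) target [] ++ [s[k]]))
      = pvG br.toNat (s.take (k + 1)) := by
  have hb : 0 < br.toNat := by omega
  obtain ⟨t0, ht0⟩ : ∃ t0 : Nat, t0 = if k < br.toNat then k else k - br.toNat := ⟨_, rfl⟩
  have hcase : (k < br.toNat ∧ t0 = k) ∨ (br.toNat ≤ k ∧ t0 = k - br.toNat) := by
    split_ifs at ht0 with h
    · exact Or.inl ⟨h, ht0⟩
    · exact Or.inr ⟨by omega, ht0⟩
  have ht0b : t0 < br.toNat := by omega
  show PySem.List.pySetD (pvG br.toNat (s.take k))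
      ((PySem.List.min? (PySem.List.pyRange 0 br 1)
        (fun idx => (PySem.List.pyGetD (pvG br.toNat (s.take k)) idx ([] : List Int)).length)).getD 0)
      (PySem.List.pyGetD (pvG br.toNat (s.take k))
        ((PySem.List.min? (PySem.List.pyRange 0 br 1)
          (fun idx => (PySem.List.pyGetD (pvG br.toNat (s.take k)) idx ([] : List Int)).length)).getD 0) [] ++ [s[k]])
      = pvG br.toNat (s.take (k + 1))
  rw [pv_target br hbr s hlen k hk t0 ht0]
  simp only [Option.getD_some]
  rw [PySem.List.pyGetD_natCast, PySem.List.pySetD_natCast]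
  rw [pvG, PySem.List.getD_map_range _ _ _ _ ht0b]
  rw [show pvG br.toNat (s.take (k+1)) = (List.range br.toNat).map (pvGrp br.toNat (s.take (k+1))) from rfl]
  apply List.ext_getElem
  · simp
  · intro i h1 h2
    have hib : i < br.toNat := by simpa using h2
    rw [List.getElem_set]
    simp only [List.getElem_map, List.getElem_range]
    have hmk : min k s.length = k := by omega
    have hmk1 : min (k + 1) s.length = k + 1 := by omega
    by_cases hti : t0 = i
    · rw [if_pos hti]
      subst hti
      rw [pv_grp_take, pv_grp_take, hmk, hmk1]
      rcases hcase with ⟨hkb, htv⟩ | ⟨hkb, htv⟩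
      · rw [htv]
        rw [if_neg (show ¬ (k < k) by omega),
            if_neg (show ¬ (k + br.toNat < k) by omega),
            if_pos (Nat.lt_succ_self k),
            if_neg (show ¬ (k + br.toNat < k + 1) by omega)]
        simp [List.getElem?_eq_getElem hk]
      · rw [htv]
        have hc : k - br.toNat + br.toNat = k := by omega
        rw [hc]
        rw [if_pos (show k - br.toNat < k by omega),
            if_neg (show ¬ (k < k) by omega),
            if_pos (show k - br.toNat < k + 1 by omega),
            if_pos (Nat.lt_succ_self k)]
        simp [List.getElem?_eq_getElem hk]
    · rw [if_neg hti]
      rw [pv_grp_take, pv_grp_take, hmk, hmk1]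
      split_ifs <;> first | rfl | omega

lemma pv_loopA (br : Int) (hbr : 0 < br) (s : List Int) (hlen : s.length ≤ 2 * br.toNat) :
    ∀ n k, n = s.length - k → k ≤ s.length →
    (s.drop k).foldl
      (fun (groups : List (List Int)) (skill : Int) =>
        let target : Int := (PySem.List.min? (PySem.List.pyRange 0 br 1)
          (fun idx => (PySem.List.pyGetD groups idx ([] : List Int)).length)).getD 0
        PySem.List.pySetD groups target (PySem.List.pyGetD groups target [] ++ [skill]))
      (pvG br.toNat (s.take k)) = pvG br.toNat s := by
  intro n
  induction n with
  | zero =>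
      intro k hn hk
      have hke : k = s.length := by omega
      subst hke
      simp
  | succ n ih =>
      intro k hn hk
      have hklt : k < s.length := by omega
      rw [List.drop_eq_getElem_cons hklt, List.foldl_cons, pv_stepA br hbr s hlen k hklt]
      exact ih (k + 1) (by omega) (by omega)

-- B's slice s[i::branches] is exactly group i of the round-robin state
lemma pv_sliceB (br : Int) (hbr : 0 < br) (s : List Int) (hlen : s.length ≤ 2 * br.toNat)
    (j : Nat) (hj : j < br.toNat) :
    PySem.List.slice? s (some (j : Int)) none br = some (pvGrp br.toNat s j) := by
  have hb : 0 < br.toNat := by omega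
  simp only [PySem.List.slice?, PySem.List.sliceIndices]
  rw [if_neg (by omega : ¬ br = 0)]
  simp only [if_neg (show ¬ br < 0 by omega), if_neg (show ¬ ((j:Int)) < 0 by omega),
    if_pos hbr]
  by_cases hLe : s.length ≤ j
  · rw [show min ((j:Int)) ((s.length:Int)) = ((s.length:Int)) by omega]
    rw [if_neg (show ¬ ((s.length:Int) < (s.length:Int)) by omega)]
    simp [pvGrp, List.drop_eq_nil_of_le hLe,
      List.drop_eq_nil_of_le (show s.length ≤ j + br.toNat by omega)]
  · have hjL : j < s.length := by omega
    rw [show min ((j:Int)) ((s.length:Int)) = ((j:Int)) by omega]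
    rw [if_pos (show ((j:Int)) < ((s.length:Int)) by omega)]
    rw [pvGrp, pv_take1_drop, pv_take1_drop, if_pos hjL]
    by_cases h2 : s.length ≤ j + br.toNat
    · have hq : (((s.length:Int) - (j:Int) + br - 1) / br) = 1 := by
        have hge : 1 ≤ (((s.length:Int) - (j:Int) + br - 1) / br) :=
          (Int.le_ediv_iff_mul_le hbr).mpr (by omega)
        have hlt : (((s.length:Int) - (j:Int) + br - 1) / br) < 2 :=
          (Int.ediv_lt_iff_lt_mul hbr).mpr (by omega)
        omega
      rw [hq, if_neg (show ¬ j + br.toNat < s.length by omega)]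
      simp only [Int.toNat_one, List.range_one, List.filterMap_cons, List.filterMap_nil,
        Nat.cast_zero, mul_zero, add_zero, Int.toNat_natCast]
      rw [List.getElem?_eq_getElem hjL]
      simp [List.getD_eq_getElem?_getD, List.getElem?_eq_getElem hjL]
    · have hq : (((s.length:Int) - (j:Int) + br - 1) / br) = 2 := by
        have hge : 2 ≤ (((s.length:Int) - (j:Int) + br - 1) / br) :=
          (Int.le_ediv_iff_mul_le hbr).mpr (by omega)
        have hlt : (((s.length:Int) - (j:Int) + br - 1) / br) < 3 :=
          (Int.ediv_lt_iff_lt_mul hbr).mpr (by omega)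
        omega
      have hjb : j + br.toNat < s.length := by omega
      rw [hq, if_pos hjb]
      rw [show ((2:Int)).toNat = 2 from rfl]
      rw [show List.range 2 = [0, 1] from rfl]
      simp only [List.filterMap_cons, List.filterMap_nil,
        Nat.cast_zero, mul_zero, add_zero, Int.toNat_natCast,
        Nat.cast_one, mul_one]
      rw [show ((j:Int) + br).toNat = j + br.toNat by omega]
      rw [List.getElem?_eq_getElem hjL, List.getElem?_eq_getElem hjb]
      simp [List.getD_eq_getElem?_getD, List.getElem?_eq_getElem hjL,
        List.getElem?_eq_getElem hjb]

lemma pv_B_eq (br : Int) (hbr : 0 < br) (s : List Int) (hlen : s.length ≤ 2 * br.toNat) :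
    (PySem.List.pyRange 0 br 1).map
      (fun i => (PySem.List.slice? s (some i) none br).getD []) = pvG br.toNat s := by
  rw [PySem.List.pyRange_one, List.map_map, pvG]
  have hbn : ((br - 0).toNat) = br.toNat := by omega
  rw [hbn]
  refine List.map_congr_left ?_
  intro j hj
  rw [List.mem_range] at hj
  simp only [Function.comp_apply, zero_add]
  rw [pv_sliceB br hbr s hlen j hj]
  rfl

-- ===== VERDICT (by name: the statement is the Claim_ definition above) =====
theorem worker_skill_groups_py_spec : Claim_equal_worker_skill_groups_py := by
  intro rs br _
  unfold Spec_worker_skill_groups_py worker_skill_groups_py worker_skill_groups_py_alt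
  by_cases hbr : br ≤ 0
  · simp [hbr]
  · have hbr' : 0 < br := by omega
    simp only [if_neg hbr]
    have hs : (PySem.List.slice rs none (some (br * 2))).length ≤ 2 * br.toNat := by
      rw [PySem.List.slice_to rs (by omega)]
      simp
      omega
    have hinit : ((PySem.List.pyRange 0 br 1).map (fun _ => ([] : List Int))) = pvG br.toNat ([] : List Int) := by
      rw [PySem.List.pyRange_one, List.map_map, pvG]
      have hbn : ((br - 0).toNat) = br.toNat := by omega
      rw [hbn]
      refine List.map_congr_left ?_
      intro j hj
      simp [pvGrp]
    by_cases hrs : rs = []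
    · subst hrs
      have hnil : PySem.List.slice ([] : List Int) none (some (br * 2)) = [] := by
        rw [PySem.List.slice_to _ (by omega : (0:Int) ≤ br * 2)]
        simp
      rw [if_pos rfl, hinit, hnil, pv_B_eq br hbr' [] (by simp)]
    · rw [if_neg hrs, pv_B_eq br hbr' _ hs, hinit]
      have := pv_loopA br hbr' _ hs ((PySem.List.slice rs none (some (br * 2))).length - 0) 0 rfl (by omega)
      simpa using this
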